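-- pv_equiv track=rewrite | github.com/anriodpig/SumaToolBox | main.py | lrc_calc_offset
-- ===== SOURCE A (Python) =====
-- def lrc_calc_offset(lineHeights, lyc, frame):
--     lyc = int(lyc)
--     frame = int(frame)
--     lyc_offset = 0
--     frame_offset = 0
--     if lyc == 0:
--         lyc_offset = 0
--     else:
--         for l in range(0, lyc):
--             lyc_offset = lyc_offset + int(lineHeights[l])
--     if frame == 0:
--         frame_offset = 0
--     else:
--         for f in range(0, frame):
--             frame_offset = frame_offset + int(lineHeights[f])
--     return int(frame_offset - lyc_offset)
-- ===== SOURCE B (Python) =====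
-- def lrc_calc_offset(lineHeights, lyc, frame):
--     # sum only the non-overlapping index range [lo, hi) once, with a sign
--     a = max(int(lyc), 0)
--     b = max(int(frame), 0)
--     lo, hi = (a, b) if a <= b else (b, a)
--     s = sum(lineHeights[lo:hi])
--     return int(s if frame >= lyc else -s)
-- ===== Notes on version B (the rewrite author's own statement) =====
-- stated objective: faster
-- what changed: Instead of building both prefix sums from index 0, B sums a single slice over the non-overlapping range [min,max) and applies a sign, so the shared prefix is never traversed.
import Mathlib
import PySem

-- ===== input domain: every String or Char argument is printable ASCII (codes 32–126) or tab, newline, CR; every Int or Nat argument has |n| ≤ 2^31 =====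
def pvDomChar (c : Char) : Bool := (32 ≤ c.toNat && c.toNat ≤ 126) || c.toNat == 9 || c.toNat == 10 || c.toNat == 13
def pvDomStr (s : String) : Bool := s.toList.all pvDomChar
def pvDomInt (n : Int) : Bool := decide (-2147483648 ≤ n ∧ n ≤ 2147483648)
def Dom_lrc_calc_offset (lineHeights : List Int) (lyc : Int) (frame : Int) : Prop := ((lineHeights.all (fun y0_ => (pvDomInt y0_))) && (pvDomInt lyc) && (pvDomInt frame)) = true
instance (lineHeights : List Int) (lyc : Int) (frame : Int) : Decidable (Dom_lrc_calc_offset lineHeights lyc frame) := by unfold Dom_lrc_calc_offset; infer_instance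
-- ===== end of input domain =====

-- B replaces A's two prefix-sum loops from index 0 by one signed sum over the
-- non-overlapping slice [min,max); the shared prefix is never traversed (faster).

-- ===== PORT A =====
-- literal transliteration of A: two range(0, ·) loops accumulating prefix sums.
-- lineHeights[l] is ported as pyGetD (IndexError inputs are excluded by Pre_).
def lrc_calc_offset (lineHeights : List Int) (lyc : Int) (frame : Int) : Int :=
  let lyc_offset : Int :=
    if lyc = 0 then 0
    else (PySem.List.pyRange 0 lyc 1).foldl (fun acc l => acc + PySem.List.pyGetD lineHeights l 0) 0
  let frame_offset : Int :=
    if frame = 0 then 0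
    else (PySem.List.pyRange 0 frame 1).foldl (fun acc f => acc + PySem.List.pyGetD lineHeights f 0) 0
  frame_offset - lyc_offset

-- ===== PORT B =====
def lrc_calc_offset_alt (lineHeights : List Int) (lyc : Int) (frame : Int) : Int :=
  let a := max lyc 0
  let b := max frame 0
  let lo := if a ≤ b then a else b
  let hi := if a ≤ b then b else a
  let s := (PySem.List.slice lineHeights (some lo) (some hi)).sum
  if frame ≥ lyc then s else -s

-- ===== PRECONDITION & SPEC =====
-- Pre_ excludes exactly the inputs where A raises IndexError (an index lyc-1 or
-- frame-1 past the end of lineHeights).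
def Pre_lrc_calc_offset (lineHeights : List Int) (lyc : Int) (frame : Int) : Prop :=
  lyc ≤ (lineHeights.length : Int) ∧ frame ≤ (lineHeights.length : Int)
instance (lineHeights : List Int) (lyc : Int) (frame : Int) : Decidable (Pre_lrc_calc_offset lineHeights lyc frame) := by unfold Pre_lrc_calc_offset; infer_instance

def pvWitness_lrc_calc_offset : List Int × Int × Int := ([3, 4, 5], 1, 3)

def Spec_lrc_calc_offset (lineHeights : List Int) (lyc : Int) (frame : Int) (out : Int) : Prop := out = lrc_calc_offset_alt lineHeights lyc frame
instance (lineHeights : List Int) (lyc : Int) (frame : Int) (out : Int) : Decidable (Spec_lrc_calc_offset lineHeights lyc frame out) := by unfold Spec_lrc_calc_offset; infer_instance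

-- ===== CLAIM (what is proved, stated in full; the proofs are below) =====
def Claim_equal_lrc_calc_offset : Prop := ∀ (lineHeights : List Int) (lyc : Int) (frame : Int), Dom_lrc_calc_offset lineHeights lyc frame → Pre_lrc_calc_offset lineHeights lyc frame → Spec_lrc_calc_offset lineHeights lyc frame (lrc_calc_offset lineHeights lyc frame)

-- ===== LEMMAS AND PROOFS =====

-- A's loop over range(0, n) computes the prefix sum of the first n elements.
theorem pvLoop_eq_take (hs : List Int) (n : Nat) (hn : n ≤ hs.length) :
    (PySem.List.pyRange 0 (n : Int) 1).foldl (fun acc l => acc + PySem.List.pyGetD hs l 0) 0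
      = (hs.take n).sum := by
  induction n with
  | zero => simp [PySem.List.pyRange]
  | succ m ih =>
    have hm : m ≤ hs.length := Nat.le_of_succ_le hn
    have hstep : PySem.List.pyRange 0 ((m : Int) + 1) 1
        = PySem.List.pyRange 0 (m : Int) 1 ++ [(m : Int)] :=
      PySem.List.pyRange_one_succ_right (by exact_mod_cast Nat.zero_le m)
    have hcast : ((m + 1 : Nat) : Int) = (m : Int) + 1 := by push_cast; ring
    rw [hcast, hstep, List.foldl_append, ih hm]
    have hlt : m < hs.length := hn
    simp [PySem.List.pyGetD_natCast, List.getD_eq_getElem?_getD,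
      List.getElem?_eq_getElem hlt, List.sum_take_succ _ _ hlt]

-- A's conditional prefix offset for an Int bound x ≤ len: the prefix sum of
-- the first (max x 0) elements.
theorem pvOffset_eq (hs : List Int) (x : Int) (hx : x ≤ (hs.length : Int)) :
    (if x = 0 then 0
     else (PySem.List.pyRange 0 x 1).foldl (fun acc l => acc + PySem.List.pyGetD hs l 0) 0)
      = (hs.take (max x 0).toNat).sum := by
  by_cases h0 : x = 0
  · simp [h0]
  · rw [if_neg h0]
    by_cases hneg : x < 0
    · have : PySem.List.pyRange 0 x 1 = [] := by
        simp [PySem.List.pyRange]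
        omega
      rw [this]
      have : (max x 0).toNat = 0 := by omega
      simp [this]
    · have hx0 : 0 ≤ x := le_of_not_gt hneg
      have hxe : x = ((x.toNat : Nat) : Int) := by omega
      have hlen : x.toNat ≤ hs.length := by omega
      rw [hxe, pvLoop_eq_take hs x.toNat hlen]
      congr 2
      omega

-- difference of two prefix sums = sum of the slice between them (nat bounds)
theorem pvTake_sub (hs : List Int) (a b : Nat) (hab : a ≤ b) :
    (hs.take b).sum - (hs.take a).sum = ((hs.drop a).take (b - a)).sum := by
  have : hs.take b = hs.take a ++ (hs.drop a).take (b - a) := by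
    rw [← List.take_add]
    congr 1
    omega
  rw [this, List.sum_append]
  ring

-- ===== VERDICT (by name: the statement is the Claim_ definition above) =====
theorem lrc_calc_offset_spec : Claim_equal_lrc_calc_offset := by
  intro hs lyc frame _ hpre
  obtain ⟨hl, hf⟩ := hpre
  unfold Spec_lrc_calc_offset lrc_calc_offset lrc_calc_offset_alt
  simp only
  rw [pvOffset_eq hs lyc hl, pvOffset_eq hs frame hf]
  have ha0 : (0 : Int) ≤ max lyc 0 := le_max_right _ _
  have hb0 : (0 : Int) ≤ max frame 0 := le_max_right _ _
  by_cases h : max lyc 0 ≤ max frame 0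
  · have hge : frame ≥ lyc ∨ (max lyc 0 = max frame 0) := by omega
    simp only [if_pos h]
    rw [PySem.List.slice_toNat hs ha0 hb0,
      ← pvTake_sub hs (max lyc 0).toNat (max frame 0).toNat (by omega)]
    rcases hge with hge | heq
    · rw [if_pos hge]
    · rw [heq]
      split <;> ring
  · have hlt : ¬ frame ≥ lyc := by omega
    simp only [if_neg h, if_neg hlt]
    rw [PySem.List.slice_toNat hs hb0 ha0,
      ← pvTake_sub hs (max frame 0).toNat (max lyc 0).toNat (by omega)]
    ring
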